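-- pv_equiv track=rewrite | github.com/Impactivity/implement | routeofLight.py | solution
-- ===== SOURCE A (Python) =====
-- def solution(grid):
--     answer = []
--     row = len(grid)
--     col = len(grid[0])
--
--     visited = [[[False] * 4 for _ in range(col)] for _ in range(row)]
--
--     # 상,우,하,좌
--     dx = [-1, 0, 1, 0]
--     dy = [0, 1, 0, -1]
--
--     for sx in range(row):
--         for sy in range(col):
--             for sd in range(4):
--                 if not visited[sx][sy][sd]:
--                     visited[sx][sy][sd] = True
--                     cnt = 0
--                     nx, ny, d = sx, sy, sd
--                     while True:
--                         nx = (nx + dx[d]) % row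
--                         ny = (ny + dy[d]) % col
--                         cnt += 1
--
--                         if grid[nx][ny] == 'R':
--                             d = (d + 1) % 4
--                         elif grid[nx][ny] == 'L':
--                             d = (d - 1) % 4
--
--                         if visited[nx][ny][d]:
--                             if (nx, ny, d) == (sx, sy, sd):
--                                 break
--                             else:
--                                 cnt = 0
--                                 break
--                         visited[nx][ny][d] = True
--
--                     if cnt != 0:
--                         answer.append(cnt)
--
--     answer.sort()
--
--     return answer
-- ===== SOURCE B (Python) =====
-- def solution(grid):
--     rows = len(grid)
--     cols = len(grid[0])
--
--     def step(x, y, d):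
--         if d == 0:
--             x = (x - 1) % rows
--         elif d == 1:
--             y = (y + 1) % cols
--         elif d == 2:
--             x = (x + 1) % rows
--         else:
--             y = (y - 1) % cols
--         c = grid[x][y]
--         if c == 'R':
--             d = (d + 1) % 4
--         elif c == 'L':
--             d = (d - 1) % 4
--         return x, y, d
--
--     def rep(x, y, d):
--         # canonical representative: the lexicographically smallest state on
--         # the closed orbit through (x, y, d)
--         best = (x, y, d)
--         cur = step(x, y, d)
--         while cur != (x, y, d):
--             if cur < best:
--                 best = cur
--             cur = step(*cur)
--         return best
--
--     # every state belongs to exactly one closed beam orbit; the multiplicity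
--     # of an orbit's representative is exactly that cycle's length
--     reps = [rep(x, y, d) for x in range(rows) for y in range(cols) for d in range(4)]
--     counts = {}
--     for r in reps:
--         counts[r] = counts.get(r, 0) + 1
--     return sorted(counts.values())
-- ===== Notes on version B (the rewrite author's own statement) =====
-- stated objective: alternative
-- what changed: B has no visited structure and never decomposes cycles: it maps every state independently to a canonical representative (the lexicographically smallest state on its closed orbit), histograms the representatives with a dict, and returns the sorted multiplicities (each cycle's length equals its representative's count); A instead scans states marking a visited array and records each unvisited state's walk length. B trades speed for this: it is O(R*C*L) in the worst case versus A's O(R*C).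
-- outside the precondition, e.g. on solution([]): A raises IndexError, B raises IndexError; on solution(['RL', 'R']): A raises IndexError, B raises IndexError
import Mathlib
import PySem

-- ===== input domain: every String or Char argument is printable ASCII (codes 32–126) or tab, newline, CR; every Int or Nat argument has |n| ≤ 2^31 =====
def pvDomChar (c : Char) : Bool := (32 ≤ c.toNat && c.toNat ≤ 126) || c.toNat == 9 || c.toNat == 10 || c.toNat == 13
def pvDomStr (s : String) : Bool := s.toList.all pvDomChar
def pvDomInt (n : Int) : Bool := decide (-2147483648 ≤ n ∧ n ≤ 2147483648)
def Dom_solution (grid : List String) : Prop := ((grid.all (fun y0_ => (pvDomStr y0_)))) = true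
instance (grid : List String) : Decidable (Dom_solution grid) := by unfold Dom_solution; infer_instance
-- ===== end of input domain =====

-- B drops A's visited-array scan entirely: it maps every beam state to the
-- lexicographically smallest state of its closed orbit and histograms these
-- canonical representatives (each cycle's length = its representative's
-- multiplicity); objective: alternative (A stays O(R·C), B is O(R·C·L)).

-- ===== PORT A =====
-- Port of A.  Python's 3-d boolean array `visited` is represented by the list
-- of marked (x, y, d) triples; grid[nx][ny] is in range on every input admitted
-- by Pre_solution, so the getD defaults below are never consulted there.

-- dx[d] / dy[d] table lookups
def aDx (d : Int) : Int := PySem.List.pyGetD [-1, 0, 1, 0] d 0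
def aDy (d : Int) : Int := PySem.List.pyGetD [0, 1, 0, -1] d 0

-- grid[x][y]  (both indices are ≥ 0 and in range wherever evaluated under Pre_)
def aCell (grid : List String) (x y : Int) : Char :=
  ((PySem.List.pyGetD grid x "").toList).getD y.toNat ' '

-- the first three statements of A's while-loop body (step with wraparound, turn)
def aStep (grid : List String) (row col : Int) (p : Int × Int × Int) : Int × Int × Int :=
  let nx := PySem.Int.mod (p.1 + aDx p.2.2) row
  let ny := PySem.Int.mod (p.2.1 + aDy p.2.2) col
  let d' := if aCell grid nx ny = 'R' then PySem.Int.mod (p.2.2 + 1) 4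
            else if aCell grid nx ny = 'L' then PySem.Int.mod (p.2.2 - 1) 4
            else p.2.2
  (nx, ny, d')

-- A's inner `while True` loop; the fuel only makes the recursion structural —
-- it is never exhausted, since each pass marks a previously unmarked state
def aLoop (grid : List String) (row col sx sy sd : Int) :
    Nat → Int → Int × Int × Int → List (Int × Int × Int) → Int × List (Int × Int × Int)
  | 0, cnt, _, vis => (cnt, vis)
  | fuel + 1, cnt, p, vis =>
    let q := aStep grid row col p
    let cnt' := cnt + 1
    if q ∈ vis then
      (if q = (sx, sy, sd) then (cnt', vis) else (0, vis))
    else aLoop grid row col sx sy sd fuel cnt' q (q :: vis)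

-- the body of A's innermost `for sd` loop
def aBody (grid : List String) (row col : Int)
    (acc : List Int × List (Int × Int × Int)) (p : Int × Int × Int) :
    List Int × List (Int × Int × Int) :=
  if p ∈ acc.2 then acc
  else
    let r := aLoop grid row col p.1 p.2.1 p.2.2 ((row * col * 4).toNat + 1) 0 p (p :: acc.2)
    if r.1 ≠ 0 then (acc.1 ++ [r.1], r.2) else (acc.1, r.2)

def solution (grid : List String) : List Int :=
  let row : Int := grid.length
  let col : Int := (grid.headD "").length
  let res :=
    (PySem.List.pyRange 0 row 1).foldl (fun acc sx =>
      (PySem.List.pyRange 0 col 1).foldl (fun acc sy =>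
        (PySem.List.pyRange 0 4 1).foldl (fun acc sd =>
          aBody grid row col acc (sx, sy, sd)) acc) acc) ([], [])
  PySem.List.sorted res.1 (fun x => x) false

-- ===== PORT B =====
-- Port of B: every state is mapped to the lexicographically smallest state of
-- its orbit (helper `rep`, here bWalk); the representatives are histogrammed
-- with a dict and the sorted multiplicities are returned.

-- B's nested `step` helper; Python's `(x - 1) % rows` on 0 ≤ x < rows is
-- written `(x + rows - 1) % rows` in ℕ (same for columns, and `(d - 1) % 4`
-- on 0 ≤ d < 4 is `(d + 3) % 4`)
def bStep (grid : List String) (rows cols : Nat) (t : Nat × Nat × Nat) : Nat × Nat × Nat :=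
  let xy : Nat × Nat :=
    if t.2.2 = 0 then ((t.1 + rows - 1) % rows, t.2.1)
    else if t.2.2 = 1 then (t.1, (t.2.1 + 1) % cols)
    else if t.2.2 = 2 then ((t.1 + 1) % rows, t.2.1)
    else (t.1, (t.2.1 + cols - 1) % cols)
  let c := ((grid.getD xy.1 "").toList).getD xy.2 ' '
  let d' := if c = 'R' then (t.2.2 + 1) % 4
            else if c = 'L' then (t.2.2 + 3) % 4
            else t.2.2
  (xy.1, xy.2, d')

-- Python's tuple comparison `cur < best` (lexicographic on the 3-tuples)
def bLt (a b : Nat × Nat × Nat) : Bool :=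
  decide (a.1 < b.1) ||
    (decide (a.1 = b.1) &&
      (decide (a.2.1 < b.2.1) || (decide (a.2.1 = b.2.1) && decide (a.2.2 < b.2.2))))

-- B's helper `rep`: the `while cur != start` walk keeping the smallest state
-- seen; the fuel only makes the recursion structural — it is never exhausted,
-- since the walk returns to its start after at most rows*cols*4 steps
def bWalk (grid : List String) (rows cols : Nat) (start : Nat × Nat × Nat) :
    Nat → Nat × Nat × Nat → Nat × Nat × Nat → Nat × Nat × Nat
  | 0, _, best => best
  | fuel + 1, cur, best =>
    if cur = start then best
    else bWalk grid rows cols start fuel (bStep grid rows cols cur)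
      (if bLt cur best then cur else best)

def solution_alt (grid : List String) : List Int :=
  let rows := grid.length
  let cols := (grid.headD "").length
  let reps := (List.range rows).flatMap (fun x =>
    (List.range cols).flatMap (fun y =>
      (List.range 4).map (fun d =>
        bWalk grid rows cols (x, y, d) (rows * cols * 4)
          (bStep grid rows cols (x, y, d)) (x, y, d))))
  let counts := reps.foldl
    (fun d r => PySem.Dict.insert d r (PySem.Dict.getD d r 0 + 1)) PySem.Dict.empty
  PySem.List.sorted (PySem.Dict.values counts) (fun v => v) false

-- ===== PRECONDITION & SPEC =====
-- Pre_ excludes exactly the inputs where Python A raises: the empty grid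
-- (len(grid[0]) → IndexError) and grids with a row shorter than the first row
-- (grid[nx][ny] → IndexError, since every cell in the first col(umns) is read).
def Pre_solution (grid : List String) : Prop :=
  grid ≠ [] ∧ ∀ s ∈ grid, (grid.headD "").length ≤ s.length

instance (grid : List String) : Decidable (Pre_solution grid) := by
  unfold Pre_solution; infer_instance

def pvWitness_solution : List String := ["RL", ".R"]

def Spec_solution (grid : List String) (out : List Int) : Prop := out = solution_alt grid
instance (grid : List String) (out : List Int) : Decidable (Spec_solution grid out) := by
  unfold Spec_solution; infer_instance

-- ===== CLAIM (what is proved, stated in full; the proofs are below) =====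
def Claim_equal_solution : Prop :=
  ∀ (grid : List String), Dom_solution grid → Pre_solution grid →
    Spec_solution grid (solution grid)

-- ===== LEMMAS AND PROOFS =====

-- flattened-state encode / decode and validity (proof-side only)
def decN (cols s : Nat) : Nat × Nat × Nat := (s / (4 * cols), s / 4 % cols, s % 4)
def encN (cols : Nat) (t : Nat × Nat × Nat) : Nat := (t.1 * cols + t.2.1) * 4 + t.2.2
def iT (t : Nat × Nat × Nat) : Int × Int × Int := ((t.1 : Int), (t.2.1 : Int), (t.2.2 : Int))
def Vd (rows cols : Nat) (t : Nat × Nat × Nat) : Prop :=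
  t.1 < rows ∧ t.2.1 < cols ∧ t.2.2 < 4

-- the transition on flattened state ids
def fId (grid : List String) (rows cols : Nat) (s : Nat) : Nat :=
  encN cols (bStep grid rows cols (decN cols s))

-- minimal period, orbit and orbit minimum of a state id
noncomputable def perN (grid : List String) (rows cols s : Nat) : Nat :=
  Function.minimalPeriod (fId grid rows cols) s
noncomputable def orbN (grid : List String) (rows cols s : Nat) : Finset Nat :=
  (Finset.range (perN grid rows cols s)).image (fun i => (fId grid rows cols)^[i] s)
noncomputable def MN (grid : List String) (rows cols s : Nat) : Nat :=
  if h : (orbN grid rows cols s).Nonempty then (orbN grid rows cols s).min' h else s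

-- correspondence between A's triple list `vis` and a predicate on ids
def VisRelP (cols n : Nat) (vis : List (Int × Int × Int)) (P : Nat → Prop) : Prop :=
  (∀ p ∈ vis, ∃ k, k < n ∧ p = iT (decN cols k) ∧ P k) ∧
  (∀ k, k < n → P k → iT (decN cols k) ∈ vis)

lemma enc_lt {rows cols : Nat} {t : Nat × Nat × Nat} (h : Vd rows cols t) :
    encN cols t < rows * cols * 4 := by
  obtain ⟨x, y, d⟩ := t
  obtain ⟨h1, h2, h3⟩ := h
  show (x * cols + y) * 4 + d < rows * cols * 4
  simp only [Vd] at h1 h2 h3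
  have : x * cols + y < rows * cols := by
    calc x * cols + y < x * cols + cols := by omega
    _ = (x + 1) * cols := by ring
    _ ≤ rows * cols := Nat.mul_le_mul_right _ (by omega)
  omega

lemma dec_vd {rows cols s : Nat} (h : s < rows * cols * 4) : Vd rows cols (decN cols s) := by
  have hc : 0 < cols := by by_contra h0; simp [Nat.eq_zero_of_not_pos h0] at h
  refine ⟨?_, Nat.mod_lt _ hc, Nat.mod_lt _ (by omega)⟩
  simp only [decN]
  rw [Nat.div_lt_iff_lt_mul (by omega)]
  calc s < rows * cols * 4 := h
  _ = rows * (4 * cols) := by ring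

lemma enc_dec {rows cols s : Nat} (h : s < rows * cols * 4) :
    encN cols (decN cols s) = s := by
  have hc : 0 < cols := by by_contra h0; simp [Nat.eq_zero_of_not_pos h0] at h
  simp only [encN, decN]
  have h1 : s / (4 * cols) = s / 4 / cols := (Nat.div_div_eq_div_mul s 4 cols).symm
  have h2 : cols * (s / 4 / cols) + s / 4 % cols = s / 4 := Nat.div_add_mod _ _
  have h3 : 4 * (s / 4) + s % 4 = s := Nat.div_add_mod _ _
  rw [Nat.mul_comm] at h2
  rw [h1, h2]
  omega

lemma dec_enc {rows cols : Nat} {t : Nat × Nat × Nat} (h : Vd rows cols t) :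
    decN cols (encN cols t) = t := by
  obtain ⟨x, y, d⟩ := t
  obtain ⟨h1, h2, h3⟩ := h
  simp only [Vd] at h1 h2 h3
  simp only [encN, decN]
  refine Prod.ext ?_ (Prod.ext ?_ ?_)
  · show ((x * cols + y) * 4 + d) / (4 * cols) = x
    apply Nat.div_eq_of_lt_le
    · have e : x * (4 * cols) = x * cols * 4 := by ring
      omega
    · have e : (x + 1) * (4 * cols) = x * cols * 4 + 4 * cols := by ring
      omega
  · show ((x * cols + y) * 4 + d) / 4 % cols = y
    have e : ((x * cols + y) * 4 + d) / 4 = x * cols + y := by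
      apply Nat.div_eq_of_lt_le <;> omega
    rw [e, show x * cols + y = y + x * cols by ring, Nat.add_mul_mod_self_right,
      Nat.mod_eq_of_lt h2]
  · show ((x * cols + y) * 4 + d) % 4 = d
    rw [show (x * cols + y) * 4 + d = d + (x * cols + y) * 4 by ring,
      Nat.add_mul_mod_self_right, Nat.mod_eq_of_lt h3]

lemma bStep_vd {grid : List String} {rows cols : Nat} {t : Nat × Nat × Nat}
    (h : Vd rows cols t) : Vd rows cols (bStep grid rows cols t) := by
  obtain ⟨x, y, d⟩ := t
  obtain ⟨h1, h2, h3⟩ := h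
  simp only [Vd] at h1 h2 h3 ⊢
  have hr : 0 < rows := by omega
  have hc : 0 < cols := by omega
  have hd : d = 0 ∨ d = 1 ∨ d = 2 ∨ d = 3 := by omega
  rcases hd with hd | hd | hd | hd <;> subst hd <;>
    simp only [bStep] <;> norm_num <;> split_ifs <;>
    refine ⟨?_, ?_, ?_⟩ <;>
    first
      | exact Nat.mod_lt _ hr
      | exact Nat.mod_lt _ hc
      | exact Nat.mod_lt _ (by omega)
      | omega

lemma decWrap {x r : Nat} (h : x < r) :
    (x + r - 1) % r = if x = 0 then r - 1 else x - 1 := by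
  rcases x with _ | x
  · simp [Nat.mod_eq_of_lt (show r - 1 < r by omega)]
  · have : x + 1 + r - 1 = r + x := by omega
    rw [this]
    simp [Nat.add_mod_left, Nat.mod_eq_of_lt (show x < r by omega)]

lemma incWrap {x r : Nat} (h : x < r) :
    (x + 1) % r = if x + 1 = r then 0 else x + 1 := by
  split_ifs with he
  · simp [he]
  · exact Nat.mod_eq_of_lt (by omega)

lemma decWrap_inj {x1 x2 r : Nat} (h1 : x1 < r) (h2 : x2 < r)
    (h : (x1 + r - 1) % r = (x2 + r - 1) % r) : x1 = x2 := by
  rw [decWrap h1, decWrap h2] at h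
  split_ifs at h <;> omega

lemma incWrap_inj {x1 x2 r : Nat} (h1 : x1 < r) (h2 : x2 < r)
    (h : (x1 + 1) % r = (x2 + 1) % r) : x1 = x2 := by
  rw [incWrap h1, incWrap h2] at h
  split_ifs at h <;> omega

lemma bStep_inj {grid : List String} {rows cols : Nat} {t1 t2 : Nat × Nat × Nat}
    (h1 : Vd rows cols t1) (h2 : Vd rows cols t2)
    (h : bStep grid rows cols t1 = bStep grid rows cols t2) : t1 = t2 := by
  obtain ⟨x1, y1, d1⟩ := t1
  obtain ⟨x2, y2, d2⟩ := t2
  simp only [Vd] at h1 h2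
  obtain ⟨hx1, hy1, hd1⟩ := h1
  obtain ⟨hx2, hy2, hd2⟩ := h2
  have e1 : d1 = 0 ∨ d1 = 1 ∨ d1 = 2 ∨ d1 = 3 := by omega
  have e2 : d2 = 0 ∨ d2 = 1 ∨ d2 = 2 ∨ d2 = 3 := by omega
  rcases e1 with rfl | rfl | rfl | rfl <;> rcases e2 with rfl | rfl | rfl | rfl <;>
    simp only [bStep, Prod.mk.injEq] at h ⊢ <;> norm_num at h ⊢ <;>
    obtain ⟨hp1, hp2, hd'⟩ := h <;>
    first
      | exact ⟨decWrap_inj hx1 hx2 hp1, hp2⟩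
      | exact ⟨hp1, incWrap_inj hy1 hy2 hp2⟩
      | exact ⟨incWrap_inj hx1 hx2 hp1, hp2⟩
      | exact ⟨hp1, decWrap_inj hy1 hy2 hp2⟩
      | (rw [hp1, hp2] at hd'; split_ifs at hd' <;> omega)

-- iterate facts for f := fId grid rows cols on [0, n)
lemma fId_lt {grid : List String} {rows cols s : Nat} (h : s < rows * cols * 4) :
    fId grid rows cols s < rows * cols * 4 := by
  exact enc_lt (bStep_vd (dec_vd h))

lemma fId_inj {grid : List String} {rows cols s t : Nat}
    (hs : s < rows * cols * 4) (ht : t < rows * cols * 4)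
    (h : fId grid rows cols s = fId grid rows cols t) : s = t := by
  unfold fId at h
  have hvs := bStep_vd (grid := grid) (dec_vd hs)
  have hvt := bStep_vd (grid := grid) (dec_vd ht)
  have := congrArg (decN cols) h
  rw [dec_enc hvs, dec_enc hvt] at this
  have := bStep_inj (dec_vd hs) (dec_vd ht) this
  have := congrArg (encN cols) this
  rwa [enc_dec hs, enc_dec ht] at this

lemma iter_lt {grid : List String} {rows cols s : Nat} (h : s < rows * cols * 4) :
    ∀ i, (fId grid rows cols)^[i] s < rows * cols * 4 := by
  intro i
  induction i with
  | zero => simpa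
  | succ i ih => rw [Function.iterate_succ_apply']; exact fId_lt ih

lemma iter_cancel {grid : List String} {rows cols s t : Nat}
    (hs : s < rows * cols * 4) (ht : t < rows * cols * 4) :
    ∀ i, (fId grid rows cols)^[i] s = (fId grid rows cols)^[i] t → s = t := by
  intro i
  induction i with
  | zero => simpa
  | succ i ih =>
    intro h
    rw [Function.iterate_succ_apply', Function.iterate_succ_apply'] at h
    exact ih (fId_inj (iter_lt hs i) (iter_lt ht i) h)

lemma exists_period {grid : List String} {rows cols s : Nat} (hs : s < rows * cols * 4) :
    ∃ m, 0 < m ∧ m ≤ rows * cols * 4 ∧ (fId grid rows cols)^[m] s = s := by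
  have key : ∀ i j, i < j → j ≤ rows * cols * 4 →
      (fId grid rows cols)^[i] s = (fId grid rows cols)^[j] s →
      ∃ m, 0 < m ∧ m ≤ rows * cols * 4 ∧ (fId grid rows cols)^[m] s = s := by
    intro i j hlt hle he
    refine ⟨j - i, by omega, by omega, ?_⟩
    apply iter_cancel (iter_lt hs _) hs i
    rw [← Function.iterate_add_apply, show i + (j - i) = j by omega]
    exact he.symm
  have hmaps : ∀ i ∈ Finset.range (rows * cols * 4 + 1),
      (fId grid rows cols)^[i] s ∈ Finset.range (rows * cols * 4) := by
    intro i _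
    exact Finset.mem_range.2 (iter_lt hs i)
  obtain ⟨i, hi, j, hj, hne, heq⟩ :=
    Finset.exists_ne_map_eq_of_card_lt_of_maps_to (by simp) hmaps
  rw [Finset.mem_range] at hi hj
  rcases Nat.lt_or_ge i j with hij | hij
  · exact key i j hij (by omega) heq
  · exact key j i (by omega) (by omega) heq.symm

-- minimal-period facts (all under s < rows*cols*4)
lemma mem_periodic {grid : List String} {rows cols s : Nat} (hs : s < rows * cols * 4) :
    s ∈ Function.periodicPts (fId grid rows cols) := by
  obtain ⟨m, hm0, _, hmf⟩ := exists_period (grid := grid) hs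
  exact Function.mem_periodicPts.2 ⟨m, hm0, hmf⟩

lemma per_pos {grid : List String} {rows cols s : Nat} (hs : s < rows * cols * 4) :
    0 < perN grid rows cols s :=
  Function.minimalPeriod_pos_of_mem_periodicPts (mem_periodic hs)

lemma per_le {grid : List String} {rows cols s : Nat} (hs : s < rows * cols * 4) :
    perN grid rows cols s ≤ rows * cols * 4 := by
  obtain ⟨m, hm0, hmn, hmf⟩ := exists_period (grid := grid) hs
  exact le_trans (Function.IsPeriodicPt.minimalPeriod_le hm0 hmf) hmn

lemma iter_per (grid : List String) (rows cols s : Nat) :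
    (fId grid rows cols)^[perN grid rows cols s] s = s :=
  Function.iterate_minimalPeriod

lemma per_min {grid : List String} {rows cols s i : Nat} (hi0 : 0 < i)
    (hip : i < perN grid rows cols s) : (fId grid rows cols)^[i] s ≠ s := by
  intro h
  have := Function.IsPeriodicPt.minimalPeriod_le hi0 h
  unfold perN at hip
  omega

lemma iter_mod (grid : List String) (rows cols s i : Nat) :
    (fId grid rows cols)^[i % perN grid rows cols s] s = (fId grid rows cols)^[i] s :=
  Function.iterate_mod_minimalPeriod_eq

lemma mem_orb {grid : List String} {rows cols s t : Nat} (hs : s < rows * cols * 4) :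
    t ∈ orbN grid rows cols s ↔ ∃ j, (fId grid rows cols)^[j] s = t := by
  constructor
  · intro h
    obtain ⟨i, _, he⟩ := Finset.mem_image.1 h
    exact ⟨i, he⟩
  · rintro ⟨j, rfl⟩
    exact Finset.mem_image.2 ⟨j % perN grid rows cols s,
      Finset.mem_range.2 (Nat.mod_lt _ (per_pos hs)), iter_mod grid rows cols s j⟩

lemma self_mem_orb {grid : List String} {rows cols s : Nat} (hs : s < rows * cols * 4) :
    s ∈ orbN grid rows cols s := (mem_orb hs).2 ⟨0, rfl⟩

lemma orb_iter {grid : List String} {rows cols s : Nat} (hs : s < rows * cols * 4) (i : Nat) :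
    orbN grid rows cols ((fId grid rows cols)^[i] s) = orbN grid rows cols s := by
  have hsi : (fId grid rows cols)^[i] s < rows * cols * 4 := iter_lt hs i
  apply Finset.ext
  intro t
  rw [mem_orb hsi, mem_orb hs]
  constructor
  · rintro ⟨j, rfl⟩
    exact ⟨j + i, Function.iterate_add_apply _ j i s⟩
  · rintro ⟨j, rfl⟩
    have hper := per_pos (grid := grid) hs
    refine ⟨j + (perN grid rows cols s - i % perN grid rows cols s), ?_⟩
    have hks : (fId grid rows cols)^[perN grid rows cols s - i % perN grid rows cols s]
        ((fId grid rows cols)^[i] s) = s := by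
      rw [← Function.iterate_add_apply]
      have h1 : i % perN grid rows cols s < perN grid rows cols s := Nat.mod_lt _ hper
      have hdm := Nat.div_add_mod i (perN grid rows cols s)
      have e : perN grid rows cols s * (i / perN grid rows cols s + 1)
          = perN grid rows cols s * (i / perN grid rows cols s) + perN grid rows cols s := by
        ring
      have h2 : perN grid rows cols s - i % perN grid rows cols s + i
          = perN grid rows cols s * (i / perN grid rows cols s + 1) := by
        omega
      rw [h2]
      exact Function.IsPeriodicPt.mul_const (iter_per grid rows cols s) _
    rw [Function.iterate_add_apply, hks]

lemma MN_eq_min' {grid : List String} {rows cols s : Nat} (hs : s < rows * cols * 4) :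
    MN grid rows cols s = (orbN grid rows cols s).min' ⟨s, self_mem_orb hs⟩ := by
  unfold MN
  rw [dif_pos ⟨s, self_mem_orb hs⟩]

lemma MN_mem {grid : List String} {rows cols s : Nat} (hs : s < rows * cols * 4) :
    MN grid rows cols s ∈ orbN grid rows cols s := by
  rw [MN_eq_min' hs]
  exact Finset.min'_mem _ _

lemma MN_le {grid : List String} {rows cols s t : Nat} (hs : s < rows * cols * 4)
    (ht : t ∈ orbN grid rows cols s) : MN grid rows cols s ≤ t := by
  rw [MN_eq_min' hs]
  exact Finset.min'_le _ _ ht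

lemma MN_lt_n {grid : List String} {rows cols s : Nat} (hs : s < rows * cols * 4) :
    MN grid rows cols s < rows * cols * 4 := by
  obtain ⟨j, hj⟩ := (mem_orb hs).1 (MN_mem hs)
  rw [← hj]
  exact iter_lt hs j

lemma MN_le_self {grid : List String} {rows cols s : Nat} (hs : s < rows * cols * 4) :
    MN grid rows cols s ≤ s := MN_le hs (self_mem_orb hs)

lemma MN_iter {grid : List String} {rows cols s : Nat} (hs : s < rows * cols * 4) (i : Nat) :
    MN grid rows cols ((fId grid rows cols)^[i] s) = MN grid rows cols s := by
  have e := orb_iter (grid := grid) hs i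
  apply le_antisymm
  · apply MN_le (iter_lt hs i)
    rw [e]
    exact MN_mem hs
  · apply MN_le hs
    rw [← e]
    exact MN_mem (iter_lt hs i)

lemma MN_idem {grid : List String} {rows cols s : Nat} (hs : s < rows * cols * 4) :
    MN grid rows cols (MN grid rows cols s) = MN grid rows cols s := by
  obtain ⟨j, hj⟩ := (mem_orb hs).1 (MN_mem hs)
  rw [← hj, MN_iter hs j, hj]

lemma MN_eq_iff {grid : List String} {rows cols s r : Nat} (hs : s < rows * cols * 4)
    (hr : r < rows * cols * 4) (hrm : MN grid rows cols r = r) :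
    MN grid rows cols s = r ↔ s ∈ orbN grid rows cols r := by
  constructor
  · intro h
    obtain ⟨j, hj⟩ := (mem_orb hs).1 (MN_mem hs)
    rw [h] at hj
    have horb : orbN grid rows cols r = orbN grid rows cols s := by
      rw [← hj]
      exact orb_iter hs j
    rw [horb]
    exact self_mem_orb hs
  · intro h
    obtain ⟨j, hj⟩ := (mem_orb hr).1 h
    rw [← hj, MN_iter hr j, hrm]

lemma orb_card {grid : List String} {rows cols s : Nat} (hs : s < rows * cols * 4) :
    (orbN grid rows cols s).card = perN grid rows cols s := by
  unfold orbN
  rw [Finset.card_image_of_injOn, Finset.card_range]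
  intro i hi j hj he
  rw [Finset.coe_range, Set.mem_Iio] at hi hj
  by_contra hne
  rcases Nat.lt_or_ge i j with hij | hij
  · have : (fId grid rows cols)^[j - i] s = s := by
      apply iter_cancel (iter_lt hs _) hs i
      rw [← Function.iterate_add_apply, show i + (j - i) = j by omega]
      exact he.symm
    exact per_min (by omega) (by omega) this
  · have hij' : j < i := by omega
    have : (fId grid rows cols)^[i - j] s = s := by
      apply iter_cancel (iter_lt hs _) hs j
      rw [← Function.iterate_add_apply, show j + (i - j) = i by omega]
      exact he
    exact per_min (by omega) (by omega) this

-- counting: the states whose orbit minimum is r are exactly r's orbit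
lemma countP_MN {grid : List String} {rows cols r : Nat} (hr : r < rows * cols * 4)
    (hrm : MN grid rows cols r = r) :
    (List.range (rows * cols * 4)).countP (fun s => decide (MN grid rows cols s = r))
      = perN grid rows cols r := by
  rw [List.countP_eq_length_filter]
  have hnd : ((List.range (rows * cols * 4)).filter
      (fun s => decide (MN grid rows cols s = r))).Nodup :=
    (List.nodup_range).filter _
  have hfin : ((List.range (rows * cols * 4)).filter
      (fun s => decide (MN grid rows cols s = r))).toFinset = orbN grid rows cols r := by
    apply Finset.ext
    intro t
    rw [List.mem_toFinset, List.mem_filter, List.mem_range]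
    constructor
    · rintro ⟨ht, he⟩
      exact (MN_eq_iff ht hr hrm).1 (by simpa using he)
    · intro ht
      obtain ⟨j, hj⟩ := (mem_orb hr).1 ht
      have htn : t < rows * cols * 4 := by rw [← hj]; exact iter_lt hr j
      exact ⟨htn, by simp [(MN_eq_iff htn hr hrm).2 ht]⟩
  have := List.toFinset_card_of_nodup hnd
  rw [hfin] at this
  rw [← this, orb_card hr]

lemma iT_inj {t1 t2 : Nat × Nat × Nat} (h : iT t1 = iT t2) : t1 = t2 := by
  obtain ⟨a, b, c⟩ := t1
  obtain ⟨d, e, f⟩ := t2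
  simp only [iT, Prod.mk.injEq] at h ⊢
  exact ⟨by exact_mod_cast h.1, by exact_mod_cast h.2.1, by exact_mod_cast h.2.2⟩

lemma iT_dec_inj {rows cols k1 k2 : Nat} (h1 : k1 < rows * cols * 4) (h2 : k2 < rows * cols * 4)
    (h : iT (decN cols k1) = iT (decN cols k2)) : k1 = k2 := by
  have hdec := iT_inj h
  have := congrArg (encN cols) hdec
  rwa [enc_dec (rows := rows) h1, enc_dec (rows := rows) h2] at this

lemma dec_inj {rows cols k1 k2 : Nat} (h1 : k1 < rows * cols * 4) (h2 : k2 < rows * cols * 4)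
    (h : decN cols k1 = decN cols k2) : k1 = k2 := by
  have := congrArg (encN cols) h
  rwa [enc_dec (rows := rows) h1, enc_dec (rows := rows) h2] at this

-- the A-side step agrees with the B-side step on valid triples
lemma mA {v r : Nat} (h : v < r) :
    PySem.Int.mod ((v : Int) + -1) (r : Int) = (((v + r - 1) % r : Nat) : Int) := by
  have hr : (0 : Int) < (r : Int) := by exact_mod_cast Nat.pos_of_ne_zero (by omega)
  rw [PySem.Int.mod_eq_emod_of_pos hr]
  rw [show ((v : Int) + -1) = ((v + r - 1 : Nat) : Int) - (r : Int) by omega, Int.sub_emod_right]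
  rw [show ((v + r - 1 : Nat) : Int) % (r : Int) = (((v + r - 1) % r : Nat) : Int) by push_cast; ring]

lemma mB {v r : Nat} (h : v < r) : ((v : Int)) % (r : Int) = (v : Int) :=
  Int.emod_eq_of_lt (Int.natCast_nonneg v) (by exact_mod_cast h)

lemma mC {v r : Nat} (h : v < r) :
    PySem.Int.mod ((v : Int) + 1) (r : Int) = (((v + 1) % r : Nat) : Int) := by
  rw [show ((v : Int) + 1) = ((v + 1 : Nat) : Int) by push_cast; ring, PySem.Int.mod_natCast]

lemma cell_cast (grid : List String) (x y : Nat) :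
    aCell grid (x : Int) (y : Int) = ((grid.getD x "").toList).getD y ' ' := by
  simp [aCell, PySem.List.pyGetD_natCast]

lemma aStep_eq_bStep (grid : List String) {rows cols : Nat} {t : Nat × Nat × Nat}
    (h : Vd rows cols t) :
    aStep grid (rows : Int) (cols : Int) (iT t) = iT (bStep grid rows cols t) := by
  obtain ⟨x, y, d⟩ := t
  simp only [Vd] at h
  obtain ⟨hx, hy, hd⟩ := h
  have e1 : d = 0 ∨ d = 1 ∨ d = 2 ∨ d = 3 := by omega
  have hDx : ∀ d' : Nat, d' < 4 → aDx (d' : Int) = [-1, 0, 1, 0].getD d' 0 := by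
    intro d' hd'
    simp [aDx, PySem.List.pyGetD_natCast]
  have hDy : ∀ d' : Nat, d' < 4 → aDy (d' : Int) = [0, 1, 0, -1].getD d' 0 := by
    intro d' hd'
    simp [aDy, PySem.List.pyGetD_natCast]
  rcases e1 with rfl | rfl | rfl | rfl <;>
    simp only [aStep, iT, bStep, hDx _ hd, hDy _ hd] <;> norm_num
  · rw [mA hx, mB hy, cell_cast]
    exact ⟨by push_cast; ring, rfl, by simp [List.getD]; rfl⟩
  · rw [mB hx, mC hy, cell_cast]
    exact ⟨rfl, by push_cast; ring, by simp [List.getD]; rfl⟩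
  · rw [mC hx, mB hy, cell_cast]
    exact ⟨by push_cast; ring, rfl, by simp [List.getD]; rfl⟩
  · rw [mB hx, mA hy, cell_cast]
    exact ⟨rfl, by push_cast; ring, by simp [List.getD]; rfl⟩

-- A's inner loop, characterised: from an unvisited start it walks its whole
-- orbit, returns its length and marks exactly the orbit
lemma loopA_spec {grid : List String} {rows cols : Nat}
    {s : Nat} (hs : s < rows * cols * 4) {m : Nat} (hm0 : 0 < m)
    (hmf : (fId grid rows cols)^[m] s = s)
    (hmin : ∀ i, 0 < i → i < m → (fId grid rows cols)^[i] s ≠ s)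
    {V : List Nat} (hV : ∀ j, (fId grid rows cols)^[j] s ∉ V) :
    ∀ fuel i (vis : List (Int × Int × Int)), i < m → m ≤ fuel + i →
      VisRelP cols (rows * cols * 4) vis
        (fun k => k ∈ V ∨ ∃ j, j ≤ i ∧ (fId grid rows cols)^[j] s = k) →
      ∃ vis',
        aLoop grid (rows : Int) (cols : Int)
            (iT (decN cols s)).1 (iT (decN cols s)).2.1 (iT (decN cols s)).2.2
            fuel (i : Int) (iT (decN cols ((fId grid rows cols)^[i] s))) vis
          = ((m : Int), vis') ∧
        VisRelP cols (rows * cols * 4) vis'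
          (fun k => k ∈ V ∨ ∃ j, j < m ∧ (fId grid rows cols)^[j] s = k) := by
  intro fuel
  induction fuel with
  | zero => intro i vis h1 h2 _; omega
  | succ fuel ih =>
    intro i vis h1 h2 hrel
    have hvd : Vd rows cols (decN cols ((fId grid rows cols)^[i] s)) := dec_vd (iter_lt hs i)
    have hdec : decN cols ((fId grid rows cols)^[i + 1] s)
        = bStep grid rows cols (decN cols ((fId grid rows cols)^[i] s)) := by
      rw [Function.iterate_succ_apply']
      exact dec_enc (bStep_vd hvd)
    have hq : aStep grid (rows : Int) (cols : Int) (iT (decN cols ((fId grid rows cols)^[i] s)))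
        = iT (decN cols ((fId grid rows cols)^[i + 1] s)) := by
      rw [aStep_eq_bStep grid hvd, hdec]
    simp only [aLoop]
    rw [hq]
    by_cases hc : i + 1 = m
    · have hqs : decN cols ((fId grid rows cols)^[i + 1] s) = decN cols s := by
        rw [hc, hmf]
      have hin : iT (decN cols ((fId grid rows cols)^[i + 1] s)) ∈ vis := by
        rw [hqs]
        exact hrel.2 s hs (Or.inr ⟨0, by omega, rfl⟩)
      rw [if_pos hin, if_pos (by rw [hqs])]
      refine ⟨vis, ?_, ?_, ?_⟩
      · simp only [Prod.mk.injEq]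
        exact ⟨by push_cast; omega, trivial⟩
      · intro p hp
        obtain ⟨k, hk, he, hPk⟩ := hrel.1 p hp
        refine ⟨k, hk, he, ?_⟩
        rcases hPk with hV' | ⟨j, hj, he2⟩
        · exact Or.inl hV'
        · exact Or.inr ⟨j, by omega, he2⟩
      · intro k hk hPk
        apply hrel.2 k hk
        rcases hPk with hV' | ⟨j, hj, he2⟩
        · exact Or.inl hV'
        · exact Or.inr ⟨j, by omega, he2⟩
    · have h3 : i + 1 < m := by omega
      have hnin : iT (decN cols ((fId grid rows cols)^[i + 1] s)) ∉ vis := by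
        intro hmem
        obtain ⟨k, hk, he, hPk⟩ := hrel.1 _ hmem
        have hkk : (fId grid rows cols)^[i + 1] s = k := iT_dec_inj (iter_lt hs (i + 1)) hk he
        rcases hPk with hV' | ⟨j, hj, he2⟩
        · exact hV (i + 1) (hkk ▸ hV')
        · have hcyc : (fId grid rows cols)^[i + 1 - j] s = s := by
            apply iter_cancel (iter_lt hs _) hs j
            rw [← Function.iterate_add_apply, show j + (i + 1 - j) = i + 1 by omega, hkk, he2]
          exact hmin (i + 1 - j) (by omega) (by omega) hcyc
      rw [if_neg hnin]
      have hext : VisRelP cols (rows * cols * 4)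
          (iT (decN cols ((fId grid rows cols)^[i + 1] s)) :: vis)
          (fun k => k ∈ V ∨ ∃ j, j ≤ i + 1 ∧ (fId grid rows cols)^[j] s = k) := by
        constructor
        · intro p hp
          rcases List.mem_cons.1 hp with rfl | hp'
          · exact ⟨(fId grid rows cols)^[i + 1] s, iter_lt hs (i + 1), rfl,
              Or.inr ⟨i + 1, le_refl _, rfl⟩⟩
          · obtain ⟨k, hk, he, hPk⟩ := hrel.1 p hp'
            refine ⟨k, hk, he, ?_⟩
            rcases hPk with hV' | ⟨j, hj, he2⟩
            · exact Or.inl hV'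
            · exact Or.inr ⟨j, by omega, he2⟩
        · intro k hk hPk
          rcases hPk with hV' | ⟨j, hj, he2⟩
          · exact List.mem_cons_of_mem _ (hrel.2 k hk (Or.inl hV'))
          · by_cases hji : j ≤ i
            · exact List.mem_cons_of_mem _ (hrel.2 k hk (Or.inr ⟨j, hji, he2⟩))
            · have : j = i + 1 := by omega
              subst this
              rw [← he2]
              exact List.mem_cons_self
      obtain ⟨vis', heq, hrel'⟩ := ih (i + 1)
        (iT (decN cols ((fId grid rows cols)^[i + 1] s)) :: vis) h3 (by omega) hext
      refine ⟨vis', ?_, hrel'⟩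
      rw [show ((i : Int) + 1) = ((i + 1 : Nat) : Int) by push_cast; ring]
      exact heq

lemma visrel_congr {cols n : Nat} {vis : List (Int × Int × Int)} {P Q : Nat → Prop}
    (h : ∀ k, k < n → (P k ↔ Q k)) (hrel : VisRelP cols n vis P) : VisRelP cols n vis Q := by
  constructor
  · intro p hp
    obtain ⟨k, hk, he, hPk⟩ := hrel.1 p hp
    exact ⟨k, hk, he, (h k hk).1 hPk⟩
  · intro k hk hQk
    exact hrel.2 k hk ((h k hk).2 hQk)

-- A's outer scan, characterised: after the first K start ids the collected
-- lengths are the periods of the orbit minima below K, in increasing order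
lemma A_fold (grid : List String) (rows cols : Nat) :
    ∀ K, K ≤ rows * cols * 4 →
      ∃ vis,
        (List.range K).foldl
            (fun acc k => aBody grid (rows : Int) (cols : Int) acc (iT (decN cols k))) ([], [])
          = (((List.range K).filter (fun r => decide (MN grid rows cols r = r))).map
              (fun r => ((perN grid rows cols r : Nat) : Int)), vis) ∧
        VisRelP cols (rows * cols * 4) vis (fun k => MN grid rows cols k < K) := by
  intro K
  induction K with
  | zero =>
    intro _
    refine ⟨[], by simp, ?_, ?_⟩
    · intro p hp
      exact absurd hp (List.not_mem_nil)
    · intro k _ h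
      omega
  | succ K ih =>
    intro hK1
    have hK : K < rows * cols * 4 := by omega
    obtain ⟨vis, heq, hrel⟩ := ih (by omega)
    rw [List.range_succ, List.foldl_append, List.foldl_cons, List.foldl_nil, heq]
    by_cases hmin : MN grid rows cols K = K
    · -- new orbit: run the inner loop over the whole orbit
      have hnin : iT (decN cols K) ∉ vis := by
        intro hmem
        obtain ⟨k', hk', he, hPk⟩ := hrel.1 _ hmem
        have : K = k' := iT_dec_inj hK hk' he
        subst this
        omega
      have hV : ∀ j, (fId grid rows cols)^[j] K ∉
          (List.range (rows * cols * 4)).filter (fun t => decide (MN grid rows cols t < K)) := by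
        intro j hmem
        rw [List.mem_filter, List.mem_range] at hmem
        have := MN_iter (grid := grid) hK j
        rw [this, hmin] at hmem
        have := hmem.2
        simp at this
      have hrel0 : VisRelP cols (rows * cols * 4) (iT (decN cols K) :: vis)
          (fun k => k ∈ (List.range (rows * cols * 4)).filter
              (fun t => decide (MN grid rows cols t < K)) ∨
            ∃ j, j ≤ 0 ∧ (fId grid rows cols)^[j] K = k) := by
        constructor
        · intro p hp
          rcases List.mem_cons.1 hp with rfl | hp'
          · exact ⟨K, hK, rfl, Or.inr ⟨0, le_refl 0, rfl⟩⟩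
          · obtain ⟨k', hk', he, hPk⟩ := hrel.1 p hp'
            refine ⟨k', hk', he, Or.inl ?_⟩
            rw [List.mem_filter, List.mem_range]
            exact ⟨hk', by simpa using hPk⟩
        · intro k hk hPk
          rcases hPk with hPk | ⟨j, hj, he⟩
          · rw [List.mem_filter, List.mem_range] at hPk
            exact List.mem_cons_of_mem _ (hrel.2 k hk (by simpa using hPk.2))
          · have : j = 0 := by omega
            subst this
            simp only [Function.iterate_zero, id] at he
            rw [← he]
            exact List.mem_cons_self
      obtain ⟨vis', haeq, harel⟩ := loopA_spec hK (per_pos hK) (iter_per grid rows cols K)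
        (fun i hi0 hip => per_min hi0 hip) hV
        (rows * cols * 4 + 1) 0 (iT (decN cols K) :: vis) (per_pos hK) (by
          have := per_le (grid := grid) hK
          omega) hrel0
      simp only [Function.iterate_zero, id, Nat.cast_zero] at haeq
      have hfuel : (((rows : Int)) * ((cols : Int)) * 4).toNat + 1 = rows * cols * 4 + 1 := by
        rw [show ((rows : Int) * (cols : Int) * 4) = ((rows * cols * 4 : Nat) : Int) by
              push_cast; ring, Int.toNat_natCast]
      have hstep : aBody grid (rows : Int) (cols : Int)
          (((List.range K).filter (fun r => decide (MN grid rows cols r = r))).map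
            (fun r => ((perN grid rows cols r : Nat) : Int)), vis) (iT (decN cols K))
          = (((List.range K).filter (fun r => decide (MN grid rows cols r = r))).map
              (fun r => ((perN grid rows cols r : Nat) : Int))
              ++ [((perN grid rows cols K : Nat) : Int)], vis') := by
        simp only [aBody]
        rw [if_neg hnin, hfuel, haeq]
        rw [if_pos (show (((perN grid rows cols K : Nat) : Int), vis').1 ≠ 0 from
          Int.natCast_ne_zero.mpr (by have := per_pos (grid := grid) hK; omega))]
      rw [hstep]
      refine ⟨vis', ?_, ?_⟩
      · rw [List.filter_append, List.map_append]
        congr 1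
        rw [List.filter_cons, List.filter_nil]
        simp [hmin]
      · apply visrel_congr (P := fun k =>
          k ∈ (List.range (rows * cols * 4)).filter
            (fun t => decide (MN grid rows cols t < K)) ∨
          ∃ j, j < perN grid rows cols K ∧ (fId grid rows cols)^[j] K = k) ?_ harel
        intro k hk
        simp only [List.mem_filter, List.mem_range, decide_eq_true_eq]
        constructor
        · rintro (⟨_, h2⟩ | ⟨j, hj, he⟩)
          · omega
          · have : MN grid rows cols k = K := by
              apply (MN_eq_iff hk hK hmin).2
              unfold orbN
              exact Finset.mem_image.2 ⟨j, Finset.mem_range.2 hj, he⟩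
            omega
        · intro h
          by_cases hlt : MN grid rows cols k < K
          · exact Or.inl ⟨hk, hlt⟩
          · have hMk : MN grid rows cols k = K := by omega
            have := (MN_eq_iff hk hK hmin).1 hMk
            obtain ⟨j, hjr, hje⟩ := Finset.mem_image.1 this
            exact Or.inr ⟨j, Finset.mem_range.1 hjr, hje⟩
    · -- already-seen orbit: the start is visited, nothing happens
      have hMlt : MN grid rows cols K < K := by
        have := MN_le_self (grid := grid) hK
        omega
      have hin : iT (decN cols K) ∈ vis := hrel.2 K hK hMlt
      have hstep : aBody grid (rows : Int) (cols : Int)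
          (((List.range K).filter (fun r => decide (MN grid rows cols r = r))).map
            (fun r => ((perN grid rows cols r : Nat) : Int)), vis) (iT (decN cols K))
          = (((List.range K).filter (fun r => decide (MN grid rows cols r = r))).map
              (fun r => ((perN grid rows cols r : Nat) : Int)), vis) := by
        simp only [aBody]
        rw [if_pos hin]
      rw [hstep]
      refine ⟨vis, ?_, ?_⟩
      · rw [List.filter_append]
        have : (List.filter (fun r => decide (MN grid rows cols r = r)) [K]) = [] := by
          simp [hmin]
        rw [this, List.append_nil]
      · apply visrel_congr (P := fun k => MN grid rows cols k < K) ?_ hrel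
        intro k hk
        simp only []
        constructor
        · intro h
          omega
        · intro h
          by_cases hlt : MN grid rows cols k < K
          · exact hlt
          · exfalso
            have hMk : MN grid rows cols k = K := by omega
            have := MN_idem (grid := grid) hk
            rw [hMk] at this
            exact hmin this

-- tuple lexicographic order vs the flattened encoding
lemma lex_enc_lt {rows cols : Nat} {t1 t2 : Nat × Nat × Nat}
    (h1 : Vd rows cols t1) (h2 : Vd rows cols t2) (h : bLt t1 t2 = true) :
    encN cols t1 < encN cols t2 := by
  obtain ⟨x1, y1, d1⟩ := t1
  obtain ⟨x2, y2, d2⟩ := t2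
  obtain ⟨hx1, hy1, hd1⟩ := h1
  obtain ⟨hx2, hy2, hd2⟩ := h2
  simp only [Vd] at hx1 hy1 hd1 hx2 hy2 hd2
  simp only [bLt, Bool.or_eq_true, Bool.and_eq_true, decide_eq_true_eq] at h
  show (x1 * cols + y1) * 4 + d1 < (x2 * cols + y2) * 4 + d2
  rcases h with h | ⟨rfl, h | ⟨rfl, h⟩⟩
  · have e1 : (x1 + 1) * cols = x1 * cols + cols := by ring
    have e2 : (x1 + 1) * cols ≤ x2 * cols := Nat.mul_le_mul_right _ (by omega)
    omega
  · omega
  · omega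

lemma bLt_total {t1 t2 : Nat × Nat × Nat} (h : bLt t1 t2 = false) :
    t1 = t2 ∨ bLt t2 t1 = true := by
  obtain ⟨x1, y1, d1⟩ := t1
  obtain ⟨x2, y2, d2⟩ := t2
  simp only [bLt, Bool.or_eq_false_iff, Bool.and_eq_false_iff, Bool.or_eq_true,
    Bool.and_eq_true, decide_eq_true_eq, decide_eq_false_iff_not, Prod.mk.injEq] at h ⊢
  omega

lemma bLt_dec {grid : List String} {rows cols a b : Nat} (ha : a < rows * cols * 4)
    (hb : b < rows * cols * 4) :
    bLt (decN cols a) (decN cols b) = decide (a < b) := by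
  have hva := dec_vd (rows := rows) (cols := cols) ha
  have hvb := dec_vd (rows := rows) (cols := cols) hb
  by_cases hab : a < b
  · simp only [hab, decide_true]
    cases hq : bLt (decN cols a) (decN cols b) with
    | true => rfl
    | false =>
      rcases bLt_total hq with he | hlt
      · exact absurd (dec_inj ha hb he) (by omega)
      · have := lex_enc_lt hvb hva hlt
        rw [enc_dec ha, enc_dec hb] at this
        omega
  · simp only [hab, decide_false]
    cases hq : bLt (decN cols a) (decN cols b) with
    | false => rfl
    | true =>
      have := lex_enc_lt hva hvb hq
      rw [enc_dec ha, enc_dec hb] at this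
      omega

-- B's walk computes the orbit minimum
lemma bWalk_inv {grid : List String} {rows cols s : Nat} (hs : s < rows * cols * 4) :
    ∀ fuel i m, 1 ≤ i → i ≤ perN grid rows cols s →
      perN grid rows cols s ≤ fuel + i - 1 →
      (∃ j, j < i ∧ (fId grid rows cols)^[j] s = m) →
      (∀ j, j < i → m ≤ (fId grid rows cols)^[j] s) →
      bWalk grid rows cols (decN cols s) fuel (decN cols ((fId grid rows cols)^[i] s))
          (decN cols m)
        = decN cols (MN grid rows cols s) := by
  intro fuel
  induction fuel with
  | zero => intro i m h1 h2 h3 _ _; omega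
  | succ fuel ih =>
    intro i m h1 h2 h3 hmem hmin
    have hm_lt : m < rows * cols * 4 := by
      obtain ⟨j, _, hj⟩ := hmem
      rw [← hj]
      exact iter_lt hs j
    by_cases hip : i = perN grid rows cols s
    · have hcur : decN cols ((fId grid rows cols)^[i] s) = decN cols s := by
        rw [hip, iter_per]
      simp only [bWalk]
      rw [if_pos hcur]
      congr 1
      have hMm : MN grid rows cols s ≤ m := by
        obtain ⟨j, _, hj⟩ := hmem
        exact MN_le hs ((mem_orb hs).2 ⟨j, hj⟩)
      have hmM : m ≤ MN grid rows cols s := by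
        obtain ⟨j, hjr, hje⟩ := Finset.mem_image.1 (MN_mem hs)
        rw [Finset.mem_range] at hjr
        rw [← hje]
        exact hmin j (by omega)
      omega
    · have hi : i < perN grid rows cols s := by omega
      have hcur : decN cols ((fId grid rows cols)^[i] s) ≠ decN cols s := by
        intro he
        exact per_min (by omega) hi (dec_inj (iter_lt hs i) hs he)
      simp only [bWalk]
      rw [if_neg hcur]
      have hnext : bStep grid rows cols (decN cols ((fId grid rows cols)^[i] s))
          = decN cols ((fId grid rows cols)^[i + 1] s) := by
        rw [Function.iterate_succ_apply']
        exact (dec_enc (bStep_vd (dec_vd (iter_lt hs i)))).symm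
      rw [hnext, bLt_dec (grid := grid) (iter_lt hs i) hm_lt]
      by_cases hlt : (fId grid rows cols)^[i] s < m
      · rw [if_pos (by simpa using hlt)]
        apply ih (i + 1) ((fId grid rows cols)^[i] s) (by omega) (by omega) (by omega)
          ⟨i, by omega, rfl⟩
        intro j hj
        rcases Nat.lt_or_ge j i with hji | hji
        · have := hmin j hji
          omega
        · have : j = i := by omega
          subst this
          exact le_refl _
      · rw [if_neg (by simpa using hlt)]
        apply ih (i + 1) m (by omega) (by omega) (by omega)
          (by obtain ⟨j, hj1, hj2⟩ := hmem; exact ⟨j, by omega, hj2⟩)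
        intro j hj
        rcases Nat.lt_or_ge j i with hji | hji
        · exact hmin j hji
        · have : j = i := by omega
          subst this
          omega

lemma bWalk_eq {grid : List String} {rows cols s : Nat} (hs : s < rows * cols * 4) :
    bWalk grid rows cols (decN cols s) (rows * cols * 4)
        (bStep grid rows cols (decN cols s)) (decN cols s)
      = decN cols (MN grid rows cols s) := by
  have h1 : bStep grid rows cols (decN cols s) = decN cols ((fId grid rows cols)^[1] s) := by
    rw [Function.iterate_one]
    exact (dec_enc (bStep_vd (dec_vd hs))).symm
  rw [h1]
  apply bWalk_inv hs (rows * cols * 4) 1 s (le_refl 1) (per_pos hs)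
    (by have := per_le (grid := grid) hs; have := per_pos (grid := grid) hs; omega)
    ⟨0, by omega, rfl⟩
  intro j hj
  have : j = 0 := by omega
  subst this
  exact le_refl _

-- flattening the nested Python ranges: foldl form (A) and map form (B)
lemma foldl_range_mul {β : Type} (g : β → Nat → Nat → β) (R C : Nat) (init : β) :
    (List.range (R * C)).foldl (fun a k => g a (k / C) (k % C)) init
    = (List.range R).foldl (fun a x => (List.range C).foldl (fun a y => g a x y) a) init := by
  induction R generalizing init with
  | zero => simp
  | succ R ih =>
    rw [show (R + 1) * C = R * C + C by ring, List.range_add, List.foldl_append,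
      List.range_succ, List.foldl_append, ← ih]
    simp only [List.foldl_map, List.foldl_cons, List.foldl_nil]
    apply PySem.List.foldl_congr_mem
    intro a y hy
    rw [List.mem_range] at hy
    have hC : 0 < C := by omega
    have hd : (R * C + y) / C = R := by
      apply Nat.div_eq_of_lt_le
      · omega
      · have e : (R + 1) * C = R * C + C := by ring
        omega
    have hm : (R * C + y) % C = y := by
      rw [show R * C + y = y + R * C by ring, Nat.add_mul_mod_self_right,
        Nat.mod_eq_of_lt hy]
    rw [hd, hm]

lemma nested3 {β : Type} (g : β → Nat → Nat → Nat → β) (R C : Nat) (init : β) :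
    (List.range R).foldl (fun a x => (List.range C).foldl (fun a y =>
      (List.range 4).foldl (fun a d => g a x y d) a) a) init
    = (List.range (R * C * 4)).foldl
        (fun a k => g a (k / (4 * C)) (k / 4 % C) (k % 4)) init := by
  calc (List.range R).foldl (fun a x => (List.range C).foldl (fun a y =>
        (List.range 4).foldl (fun a d => g a x y d) a) a) init
      = (List.range R).foldl (fun a x => (List.range (C * 4)).foldl
          (fun a k2 => g a x (k2 / 4) (k2 % 4)) a) init := by
        apply PySem.List.foldl_congr_mem
        intro a x _
        exact (foldl_range_mul (fun a y d => g a x y d) C 4 a).symm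
    _ = (List.range (R * (C * 4))).foldl
          (fun a k => g a (k / (C * 4)) (k % (C * 4) / 4) (k % (C * 4) % 4)) init :=
        (foldl_range_mul (fun a x k2 => g a x (k2 / 4) (k2 % 4)) R (C * 4) init).symm
    _ = (List.range (R * C * 4)).foldl
          (fun a k => g a (k / (4 * C)) (k / 4 % C) (k % 4)) init := by
        rw [show R * (C * 4) = R * C * 4 by ring]
        apply PySem.List.foldl_congr_mem
        intro a k _
        have e1 : k / (C * 4) = k / (4 * C) := by rw [Nat.mul_comm]
        have e2 : k % (C * 4) / 4 = k / 4 % C := by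
          rw [Nat.mul_comm]
          exact Nat.mod_mul_right_div_self k 4 C
        have e3 : k % (C * 4) % 4 = k % 4 := Nat.mod_mod_of_dvd k ⟨C, by ring⟩
        rw [e1, e2, e3]

lemma flatMap_congr_mem {α β : Type} {l : List α} {f g : α → List β}
    (h : ∀ a ∈ l, f a = g a) : l.flatMap f = l.flatMap g := by
  induction l with
  | nil => rfl
  | cons a l ih =>
    rw [List.flatMap_cons, List.flatMap_cons, h a List.mem_cons_self,
      ih (fun a ha => h a (List.mem_cons_of_mem _ ha))]

lemma map_range_mul {α : Type} (g : Nat → Nat → α) (R C : Nat) :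
    (List.range R).flatMap (fun x => (List.range C).map (fun y => g x y))
    = (List.range (R * C)).map (fun k => g (k / C) (k % C)) := by
  induction R with
  | zero => simp
  | succ R ih =>
    rw [List.range_succ, List.flatMap_append, ih,
      show (R + 1) * C = R * C + C by ring, List.range_add, List.map_append, List.map_map]
    congr 1
    · simp only [List.flatMap_cons, List.flatMap_nil, List.append_nil]
      apply List.map_congr_left
      intro y hy
      rw [List.mem_range] at hy
      have hC : 0 < C := by omega
      have hd : (R * C + y) / C = R := by
        apply Nat.div_eq_of_lt_le
        · omega
        · have e : (R + 1) * C = R * C + C := by ring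
          omega
      have hm : (R * C + y) % C = y := by
        rw [show R * C + y = y + R * C by ring, Nat.add_mul_mod_self_right,
          Nat.mod_eq_of_lt hy]
      simp only [Function.comp]
      rw [hd, hm]

lemma nested3_map {α : Type} (g : Nat → Nat → Nat → α) (R C : Nat) :
    (List.range R).flatMap (fun x => (List.range C).flatMap (fun y =>
      (List.range 4).map (fun d => g x y d)))
    = (List.range (R * C * 4)).map
        (fun k => g (k / (4 * C)) (k / 4 % C) (k % 4)) := by
  calc (List.range R).flatMap (fun x => (List.range C).flatMap (fun y =>
        (List.range 4).map (fun d => g x y d)))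
      = (List.range R).flatMap (fun x => (List.range (C * 4)).map
          (fun k2 => g x (k2 / 4) (k2 % 4))) := by
        apply flatMap_congr_mem
        intro x _
        exact map_range_mul (fun y d => g x y d) C 4
    _ = (List.range (R * (C * 4))).map
          (fun k => g (k / (C * 4)) (k % (C * 4) / 4) (k % (C * 4) % 4)) :=
        map_range_mul (fun x k2 => g x (k2 / 4) (k2 % 4)) R (C * 4)
    _ = (List.range (R * C * 4)).map
          (fun k => g (k / (4 * C)) (k / 4 % C) (k % 4)) := by
        rw [show R * (C * 4) = R * C * 4 by ring]
        apply List.map_congr_left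
        intro k _
        have e1 : k / (C * 4) = k / (4 * C) := by rw [Nat.mul_comm]
        have e2 : k % (C * 4) / 4 = k / 4 % C := by
          rw [Nat.mul_comm]
          exact Nat.mod_mul_right_div_self k 4 C
        have e3 : k % (C * 4) % 4 = k % 4 := Nat.mod_mod_of_dvd k ⟨C, by ring⟩
        rw [e1, e2, e3]

-- B's representative list, set of representatives and multiplicities
lemma B_ofList (grid : List String) (rows cols : Nat) :
    ∀ K, K ≤ rows * cols * 4 →
      PySem.Set.ofList ((List.range K).map (fun s => decN cols (MN grid rows cols s)))
      = ((List.range K).filter (fun r => decide (MN grid rows cols r = r))).map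
          (fun r => decN cols r) := by
  intro K
  induction K with
  | zero => intro _; simp [PySem.Set.ofList]
  | succ K ih =>
    intro hK1
    have hK : K < rows * cols * 4 := by omega
    rw [List.range_succ, List.map_append, List.map_cons, List.map_nil,
      PySem.Set.ofList_append_singleton, ih (by omega)]
    by_cases hm : MN grid rows cols K = K
    · have hnin : decN cols (MN grid rows cols K) ∉
          ((List.range K).filter (fun r => decide (MN grid rows cols r = r))).map
            (fun r => decN cols r) := by
        intro hmem
        obtain ⟨r, hr, he⟩ := List.mem_map.1 hmem
        rw [List.mem_filter, List.mem_range] at hr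
        have : r = MN grid rows cols K := dec_inj (by omega) (MN_lt_n hK) he
        omega
      rw [PySem.Set.add_of_not_mem hnin, hm]
      rw [List.filter_append, List.map_append]
      congr 1
      rw [List.filter_cons, List.filter_nil]
      simp [hm]
    · have hin : decN cols (MN grid rows cols K) ∈
          ((List.range K).filter (fun r => decide (MN grid rows cols r = r))).map
            (fun r => decN cols r) := by
        apply List.mem_map.2
        refine ⟨MN grid rows cols K, ?_, rfl⟩
        rw [List.mem_filter, List.mem_range]
        have h1 := MN_le_self (grid := grid) hK
        exact ⟨by omega, by simp [MN_idem (grid := grid) hK]⟩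
      rw [PySem.Set.add_of_mem hin]
      rw [List.filter_append]
      have : (List.filter (fun r => decide (MN grid rows cols r = r)) [K]) = [] := by
        simp [hm]
      rw [this, List.append_nil]

lemma B_count (grid : List String) (rows cols : Nat) {r : Nat} (hr : r < rows * cols * 4)
    (hrm : MN grid rows cols r = r) :
    ((List.range (rows * cols * 4)).map (fun s => decN cols (MN grid rows cols s))).count
        (decN cols r)
      = perN grid rows cols r := by
  rw [List.count_eq_countP, List.countP_map]
  rw [← countP_MN hr hrm]
  apply List.countP_congr
  intro s hsm
  rw [List.mem_range] at hsm
  simp only [Function.comp]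
  have hMs : MN grid rows cols s < rows * cols * 4 := MN_lt_n hsm
  have : (decN cols (MN grid rows cols s) == decN cols r) = decide (MN grid rows cols s = r) := by
    by_cases he : MN grid rows cols s = r
    · simp [he]
    · have hne : decN cols (MN grid rows cols s) ≠ decN cols r := by
        intro hd
        exact he (dec_inj hMs hr hd)
      simp [he, hne]
  rw [this]

-- the central equality: A's sorted cycle lengths = B's sorted multiplicities
lemma main_eq (grid : List String) : solution grid = solution_alt grid := by
  simp only [solution, solution_alt]
  congr 1
  -- the A side: flatten the nested pyRanges and apply A_fold
  obtain ⟨vis, hA, -⟩ := A_fold grid grid.length (grid.headD "").length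
    (grid.length * (grid.headD "").length * 4) (le_refl _)
  rw [PySem.List.pyRange_zero_natCast grid.length,
    PySem.List.pyRange_zero_natCast (grid.headD "").length,
    show PySem.List.pyRange 0 4 1 = (List.range 4).map Nat.cast from by
      simpa using PySem.List.pyRange_zero_natCast 4]
  simp only [List.foldl_map]
  rw [nested3 (fun a x y d => aBody grid (grid.length : Int) ((grid.headD "").length : Int) a
    ((x : Int), (y : Int), (d : Int))) grid.length (grid.headD "").length ([], [])]
  simp only [iT, decN] at hA
  rw [hA]
  -- the B side: the representative list, then the counter dict
  have hreps : (List.range grid.length).flatMap (fun x =>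
      (List.range (grid.headD "").length).flatMap (fun y =>
        (List.range 4).map (fun d =>
          bWalk grid grid.length (grid.headD "").length (x, y, d)
            (grid.length * (grid.headD "").length * 4)
            (bStep grid grid.length (grid.headD "").length (x, y, d)) (x, y, d))))
      = (List.range (grid.length * (grid.headD "").length * 4)).map
          (fun k => decN (grid.headD "").length
            (MN grid grid.length (grid.headD "").length k)) := by
    rw [nested3_map (fun x y d =>
      bWalk grid grid.length (grid.headD "").length (x, y, d)
        (grid.length * (grid.headD "").length * 4)
        (bStep grid grid.length (grid.headD "").length (x, y, d)) (x, y, d))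
      grid.length (grid.headD "").length]
    apply List.map_congr_left
    intro k hk
    rw [List.mem_range] at hk
    exact bWalk_eq hk
  rw [hreps, PySem.Dict.foldl_insert_getD_add_one_eq_counter]
  simp only [PySem.Dict.values, PySem.Dict.items_counter, List.map_map]
  rw [B_ofList grid grid.length (grid.headD "").length
    (grid.length * (grid.headD "").length * 4) (le_refl _), List.map_map]
  apply List.map_congr_left
  intro r hr
  rw [List.mem_filter, List.mem_range] at hr
  simp only [Function.comp]
  rw [B_count grid grid.length (grid.headD "").length hr.1 (by simpa using hr.2)]

-- ===== VERDICT (by name: the statement is the Claim_ definition above) =====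
theorem solution_spec : Claim_equal_solution := by
  intro grid _ _
  unfold Spec_solution
  exact main_eq grid
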